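-- pv_equiv track=rewrite | github.com/rajlath/rkl_codes | HackerEarth/help_shivam.py | number_of_swaps
-- ===== SOURCE A (Python) =====
-- def number_of_swaps(array: list):
--     count = 0
--     n = len(array)
--
--     # create dict with {key:element , value:index}
--     arr_dict = []
--     for index, ele in enumerate(array):
--         arr_dict.append((ele, index))
--
--     arr_dict = sorted(arr_dict, key = lambda x: x[1], reverse=True)
--
--     # To keep track of visited elements (initalise False)
--     visited = [False] * n
--     swaps = 0
--     for i in range(n):
--         if visited[i] or arr_dict[i][1] == i:
--             continue
--         cycle_size = 0
--         j = i
--         while not visited[j]: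
--             visited[j] = True
--             j = arr_dict[j][1]
--             cycle_size += 1
--         swaps += (cycle_size - 1)
--
--
--
--     return swaps
-- ===== SOURCE B (Python) =====
-- def number_of_swaps(array: list):
--     # Sorting the (element, index) pairs by index in reverse order makes
--     # position i hold original index n-1-i, i.e. the reversal permutation:
--     # its cycles are the pairs {i, n-1-i}, so the swap count is always n//2.
--     return len(array) // 2
-- ===== Notes on version B (the rewrite author's own statement) =====
-- stated objective: faster
-- what changed: A sorts (element,index) pairs by index in reverse (yielding the reversal permutation) and counts its cycle swaps with a visited array; B uses the closed form: the reversal permutation decomposes into floor(n/2) transpositions, so it returns len(array)//2 directly.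
import Mathlib
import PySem

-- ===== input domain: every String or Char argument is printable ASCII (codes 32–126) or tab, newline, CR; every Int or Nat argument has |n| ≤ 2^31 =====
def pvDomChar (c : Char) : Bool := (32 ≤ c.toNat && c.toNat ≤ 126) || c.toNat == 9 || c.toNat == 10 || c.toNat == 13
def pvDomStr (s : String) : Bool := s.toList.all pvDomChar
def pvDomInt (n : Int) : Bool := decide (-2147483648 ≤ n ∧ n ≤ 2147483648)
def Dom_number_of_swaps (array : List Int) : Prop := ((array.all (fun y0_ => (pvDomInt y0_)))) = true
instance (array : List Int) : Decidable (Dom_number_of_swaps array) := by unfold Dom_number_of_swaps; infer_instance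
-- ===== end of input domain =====

-- B replaces A's sort + cycle-count (the sorted pair list is the reversal permutation,
-- whose cycle decomposition always needs floor(n/2) swaps) with the closed form len(array)//2.

-- ===== PORT A =====
-- the 'while not visited[j]' loop; fuel = n suffices: every iteration marks one unvisited
-- slot true, and the zero-fuel fallthrough returns the same pair the visited-check would
def pvCycle (arr : List (Int × Int)) : Nat → List Bool → Int → Int → List Bool × Int
  | 0, v, _, c => (v, c)
  | fuel + 1, v, j, c =>
    if PySem.List.pyGetD v j true then (v, c)
    else pvCycle arr fuel (PySem.List.pySetD v j true) (PySem.List.pyGetD arr j (0, 0)).2 (c + 1)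

-- one iteration of the outer 'for i in range(n)' loop
def pvStep (arr : List (Int × Int)) (n : Nat) (st : List Bool × Int) (i : Int) : List Bool × Int :=
  if PySem.List.pyGetD st.1 i true || ((PySem.List.pyGetD arr i (0, 0)).2 == i) then st
  else
    let r := pvCycle arr n st.1 i 0
    (r.1, st.2 + (r.2 - 1))

def number_of_swaps (array : List Int) : Int :=
  let n := array.length
  let arr_dict0 := (PySem.List.enumerate array 0).foldl (fun acc p => acc ++ [(p.2, p.1)]) []
  let arr_dict := PySem.List.sorted arr_dict0 (fun x => x.2) true
  let visited := List.replicate n false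
  ((PySem.List.pyRange 0 n 1).foldl (pvStep arr_dict n) (visited, 0)).2

-- ===== PORT B =====
def number_of_swaps_alt (array : List Int) : Int :=
  PySem.Int.floordiv (PySem.List.len array) 2

-- ===== PRECONDITION & SPEC =====
def Spec_number_of_swaps (array : List Int) (out : Int) : Prop := out = number_of_swaps_alt array
instance (array : List Int) (out : Int) : Decidable (Spec_number_of_swaps array out) := by unfold Spec_number_of_swaps; infer_instance

-- ===== CLAIM (what is proved, stated in full; the proofs are below) =====
def Claim_equal_number_of_swaps : Prop := ∀ (array : List Int), Dom_number_of_swaps array → Spec_number_of_swaps array (number_of_swaps array)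

-- ===== LEMMAS AND PROOFS =====

-- the visited list after the first m two-element cycles have been processed:
-- slots 0..m-1 and n-m..n-1 are marked
def pvVis (n m : Nat) : List Bool := (List.range n).map (fun j => decide (j < m ∨ n - m ≤ j))

theorem pvVis_zero (n : Nat) : pvVis n 0 = List.replicate n false := by
  simp [pvVis, List.eq_replicate_iff]

theorem pv_getD_map_range (f : Nat → Bool) (n k : Nat) (hk : k < n) (d : Bool) :
    PySem.List.pyGetD ((List.range n).map f) (k : Int) d = f k := by
  simp [pysem, List.getD_eq_getElem?_getD, hk]


theorem pvVis_getD (n m k : Nat) (hk : k < n) :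
    PySem.List.pyGetD (pvVis n m) (k : Int) true = decide (k < m ∨ n - m ≤ k) := by
  rw [pvVis]; exact pv_getD_map_range _ n k hk true

theorem pv_set_map_range {α : Type} (f : Nat → α) (n k : Nat) (b : α) (_hk : k < n) :
    ((List.range n).map f).set k b = (List.range n).map (fun j => if j = k then b else f j) := by
  apply List.ext_getElem
  · simp
  · intro i h1 h2
    simp only [List.length_map, List.length_range] at h1 h2
    simp [List.getElem_set]
    split_ifs with h h2 h3
    · rfl
    · omega
    · omega
    · rfl

-- A's sorted pair list is the reversed enumeration (indices are strictly increasing,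
-- so the reverse-by-index sort reverses the list)
theorem pv_arr_dict_eq (array : List Int) :
    PySem.List.sorted ((PySem.List.enumerate array 0).foldl (fun acc p => acc ++ [(p.2, p.1)]) []) (fun x => x.2) true
      = ((PySem.List.enumerate array 0).map (fun p => (p.2, p.1))).reverse := by
  rw [PySem.List.foldl_append_singleton_eq_map, List.nil_append]
  apply PySem.List.sorted_rev_eq_of_perm_of_pairwise_gt
  · exact List.reverse_perm _
  · rw [List.pairwise_reverse]
    refine List.Pairwise.map _ ?_ (PySem.List.pairwise_lt_enumerate array 0)
    intro a b h
    exact h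

-- hence position k of arr_dict carries original index n-1-k (the reversal permutation)
theorem pv_arr_dict_snd (array : List Int) (k : Nat) (hk : k < array.length) (d : Int × Int) :
    (PySem.List.pyGetD
      (PySem.List.sorted ((PySem.List.enumerate array 0).foldl (fun acc p => acc ++ [(p.2, p.1)]) []) (fun x => x.2) true)
      (k : Int) d).2 = ((array.length - 1 - k : Nat) : Int) := by
  rw [pv_arr_dict_eq, PySem.List.pyGetD_natCast]
  have hl : ((PySem.List.enumerate array 0).map (fun p => (p.2, p.1))).length = array.length := by
    simp [PySem.List.length_enumerate]
  rw [List.getD_eq_getElem _ _ (by simp [hl, hk])]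
  rw [List.getElem_reverse]
  simp [PySem.List.getElem_enumerate, hl]

theorem pvCycle_stop (arr : List (Int × Int)) (fuel : Nat) (v : List Bool) (j c : Int)
    (h : PySem.List.pyGetD v j true = true) : pvCycle arr fuel v j c = (v, c) := by
  cases fuel <;> simp [pvCycle, h]

theorem pvCycle_go (arr : List (Int × Int)) (fuel : Nat) (v : List Bool) (j c : Int)
    (h : PySem.List.pyGetD v j true = false) :
    pvCycle arr (fuel + 1) v j c
      = pvCycle arr fuel (PySem.List.pySetD v j true) (PySem.List.pyGetD arr j (0, 0)).2 (c + 1) := by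
  simp [pvCycle, h]

-- the inner while loop at an unvisited i < n-1-i visits exactly i and n-1-i (cycle size 2)
theorem pv_cycle_run (array : List Int) (k fuel : Nat) (hfuel : 2 ≤ fuel)
    (hk : 2 * k + 1 < array.length) :
    pvCycle
      (PySem.List.sorted ((PySem.List.enumerate array 0).foldl (fun acc p => acc ++ [(p.2, p.1)]) []) (fun x => x.2) true)
      fuel (pvVis array.length k) (k : Int) 0
      = (pvVis array.length (k + 1), 2) := by
  set n := array.length with hn
  obtain ⟨f, hf⟩ : ∃ f, fuel = f + 2 := ⟨fuel - 2, by omega⟩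
  rw [hf]
  rw [pvCycle_go _ _ _ _ _ (by
    rw [pvVis_getD n k k (by omega)]
    simp; omega)]
  rw [pv_arr_dict_snd array k (by omega)]
  rw [PySem.List.pySetD_natCast]
  rw [pvVis, pv_set_map_range _ n k _ (by omega)]
  rw [pvCycle_go _ _ _ _ _ (by
    rw [pv_getD_map_range _ n (n - 1 - k) (by omega)]
    split_ifs with h
    · omega
    · simp; omega)]
  rw [pv_arr_dict_snd array (n - 1 - k) (by omega)]
  rw [PySem.List.pySetD_natCast]
  rw [pv_set_map_range _ n (n - 1 - k) _ (by omega)]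
  have hback : n - 1 - (n - 1 - k) = k := by omega
  rw [hback]
  rw [pvCycle_stop _ _ _ _ _ (by
    rw [pv_getD_map_range _ n k (by omega)]
    simp)]
  refine Prod.ext ?_ (by norm_num)
  show _ = pvVis n (k + 1)
  rw [pvVis]
  apply List.map_congr_left
  intro j hj
  rw [List.mem_range] at hj
  split_ifs with h1 h2
  · symm; rw [decide_eq_true_iff]; omega
  · symm; rw [decide_eq_true_iff]; omega
  · rw [decide_eq_decide]; omega

-- outer-loop invariant: after the first k indices, min k (n/2) cycles have been closed
theorem pv_invariant (array : List Int) (k : Nat) (hk : k ≤ array.length) :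
    (PySem.List.pyRange 0 (k : Int) 1).foldl
        (pvStep (PySem.List.sorted ((PySem.List.enumerate array 0).foldl (fun acc p => acc ++ [(p.2, p.1)]) []) (fun x => x.2) true) array.length)
        (pvVis array.length 0, 0)
      = (pvVis array.length (min k (array.length / 2)), ((min k (array.length / 2) : Nat) : Int)) := by
  set n := array.length with hn
  induction k with
  | zero => simp [PySem.List.pyRange_one_eq_nil]
  | succ k ih =>
    have hkn : k < n := by omega
    have hcast : ((k + 1 : Nat) : Int) = (k : Int) + 1 := by push_cast; ring
    rw [hcast, PySem.List.pyRange_one_succ_right (by exact_mod_cast Int.natCast_nonneg k),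
        List.foldl_append, ih (by omega)]
    simp only [List.foldl_cons, List.foldl_nil, pvStep]
    rw [pvVis_getD n (min k (n / 2)) k hkn, pv_arr_dict_snd array k hkn]
    by_cases h1 : 2 * k + 1 < n
    · rw [show (decide (k < min k (n / 2) ∨ n - min k (n / 2) ≤ k)) = false from by
        rw [decide_eq_false_iff_not]; omega]
      rw [show ((((n - 1 - k : Nat) : Int)) == ((k : Nat) : Int)) = false from by
        simp; omega]
      simp only [Bool.or_false, Bool.false_eq_true, if_false]
      rw [show pvVis n (min k (n / 2)) = pvVis n k from by rw [show min k (n / 2) = k from by omega]]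
      rw [pv_cycle_run array k n (by omega) (by omega)]
      refine Prod.ext ?_ ?_
      · show pvVis n (k + 1) = pvVis n (min (k + 1) (n / 2))
        rw [show min (k + 1) (n / 2) = k + 1 from by omega]
      · show ((min k (n / 2) : Nat) : Int) + (2 - 1) = ((min (k + 1) (n / 2) : Nat) : Int)
        rw [show min (k + 1) (n / 2) = k + 1 from by omega, show min k (n / 2) = k from by omega]
        push_cast; ring
    · rw [show (decide (k < min k (n / 2) ∨ n - min k (n / 2) ≤ k) ||
            ((((n - 1 - k : Nat) : Int)) == ((k : Nat) : Int))) = true from by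
        by_cases h2 : 2 * k + 1 = n
        · have h3 : ((n - 1 - k : Nat) : Int) = ((k : Nat) : Int) := by
            rw [show n - 1 - k = k from by omega]
          rw [h3]; simp
        · rw [show (decide (k < min k (n / 2) ∨ n - min k (n / 2) ≤ k)) = true from by
            rw [decide_eq_true_iff]; omega]
          simp]
      simp only [if_true]
      rw [show min (k + 1) (n / 2) = min k (n / 2) from by omega]

-- ===== VERDICT (by name: the statement is the Claim_ definition above) =====
theorem number_of_swaps_spec : Claim_equal_number_of_swaps := by
  intro array _
  show number_of_swaps array = number_of_swaps_alt array
  show ((PySem.List.pyRange 0 array.length 1).foldl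
      (pvStep (PySem.List.sorted ((PySem.List.enumerate array 0).foldl (fun acc p => acc ++ [(p.2, p.1)]) []) (fun x => x.2) true) array.length)
      (List.replicate array.length false, 0)).2 = number_of_swaps_alt array
  rw [← pvVis_zero, pv_invariant array array.length le_rfl]
  rw [number_of_swaps_alt, PySem.List.len_eq, PySem.Int.floordiv_eq_ediv_of_pos (by omega)]
  show ((min array.length (array.length / 2) : Nat) : Int) = _
  omega
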